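-- pv_equiv track=rewrite | github.com/QkForce/kindergarten-doc-helper | logic/assessment_tools.py | get_common_score_type
-- ===== SOURCE A (Python) =====
-- def get_common_score_type(score_dict):
--     score_types = set(
--         [
--             metric["score"]
--             for subjects in score_dict.values()
--             for metrics in subjects.values()
--             for metric in metrics.values()
--         ]
--     )
--     return score_types.pop() if len(score_types) == 1 else 0
-- ===== SOURCE B (Python) =====
-- def get_common_score_type(score_dict):
--     candidate = None
--     for subjects in score_dict.values():
--         for metrics in subjects.values():
--             for metric in metrics.values():
--                 s = metric["score"]
--                 if candidate is None:
--                     candidate = s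
--                 elif s != candidate:
--                     return 0
--     return candidate if candidate is not None else 0
-- ===== Notes on version B (the rewrite author's own statement) =====
-- stated objective: alternative
-- what changed: Replaces the build-a-set-then-check-cardinality comprehension with a single nested walk that keeps one running candidate and returns 0 as soon as a second distinct score is seen.
import Mathlib
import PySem

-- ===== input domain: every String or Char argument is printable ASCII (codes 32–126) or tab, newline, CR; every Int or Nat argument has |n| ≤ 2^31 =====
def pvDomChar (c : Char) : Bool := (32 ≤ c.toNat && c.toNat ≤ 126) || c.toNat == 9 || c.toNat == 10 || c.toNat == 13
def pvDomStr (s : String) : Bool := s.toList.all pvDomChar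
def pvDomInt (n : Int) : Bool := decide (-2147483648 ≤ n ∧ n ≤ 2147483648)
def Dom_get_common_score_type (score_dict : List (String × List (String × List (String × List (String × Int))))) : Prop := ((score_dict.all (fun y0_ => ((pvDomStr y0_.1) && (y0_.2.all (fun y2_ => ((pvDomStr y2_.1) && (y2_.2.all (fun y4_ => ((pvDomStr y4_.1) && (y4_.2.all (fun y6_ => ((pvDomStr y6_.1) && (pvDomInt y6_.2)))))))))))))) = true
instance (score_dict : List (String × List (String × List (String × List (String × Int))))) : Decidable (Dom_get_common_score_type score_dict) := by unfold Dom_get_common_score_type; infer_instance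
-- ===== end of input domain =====

-- B replaces A's set-comprehension-then-cardinality with a nested walk keeping one running
-- candidate and an early exit on the first mismatch (alternative decomposition, same cost).

-- ===== PORT A =====
-- the comprehension's flat list of metric["score"] values (getD is total form of the lookup; Pre_ guarantees the key)
def pvScoresOf (score_dict : List (String × List (String × List (String × List (String × Int))))) : List Int :=
  score_dict.flatMap (fun subjects =>
    subjects.2.flatMap (fun metrics =>
      metrics.2.map (fun metric => (PySem.Dict.mk metric.2).getD "score" 0)))

def get_common_score_type (score_dict : List (String × List (String × List (String × List (String × Int))))) : Int :=
  let score_types : PySem.Set Int := PySem.Set.ofList (pvScoresOf score_dict)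
  if score_types.length = 1 then score_types.headD 0 else 0

-- ===== PORT B =====
-- result 'none' = the early 'return 0'; 'some c' = loop continues with candidate c
def pvGoMetrics (metrics : List (String × List (String × Int))) (cand : Option Int) :
    Option (Option Int) :=
  match metrics with
  | [] => some cand
  | metric :: rest =>
    let s := (PySem.Dict.mk metric.2).getD "score" 0
    match cand with
    | none => pvGoMetrics rest (some s)
    | some v => if s ≠ v then none else pvGoMetrics rest (some v)

def pvGoSubjects (subjects : List (String × List (String × List (String × Int)))) (cand : Option Int) :
    Option (Option Int) :=
  match subjects with
  | [] => some cand
  | metrics :: rest => (pvGoMetrics metrics.2 cand).bind (pvGoSubjects rest)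

def pvGoTop (score_dict : List (String × List (String × List (String × List (String × Int))))) (cand : Option Int) :
    Option (Option Int) :=
  match score_dict with
  | [] => some cand
  | subjects :: rest => (pvGoSubjects subjects.2 cand).bind (pvGoTop rest)

def get_common_score_type_alt (score_dict : List (String × List (String × List (String × List (String × Int))))) : Int :=
  match pvGoTop score_dict none with
  | some (some v) => v
  | _ => 0

-- ===== PRECONDITION & SPEC =====
-- Pre_ excludes exactly the inputs where A raises KeyError: some metric dict lacks the "score" key.
def Pre_get_common_score_type (score_dict : List (String × List (String × List (String × List (String × Int))))) : Prop :=
  (score_dict.all (fun subjects => subjects.2.all (fun metrics => metrics.2.all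
    (fun metric => (PySem.Dict.mk metric.2).contains "score")))) = true
instance (score_dict : List (String × List (String × List (String × List (String × Int))))) : Decidable (Pre_get_common_score_type score_dict) := by unfold Pre_get_common_score_type; infer_instance

def pvWitness_get_common_score_type : (List (String × List (String × List (String × List (String × Int))))) :=
  [("math", [("alice", [("m1", [("score", 3)]), ("m2", [("score", 3)])])])]

def Spec_get_common_score_type (score_dict : List (String × List (String × List (String × List (String × Int))))) (out : Int) : Prop := out = get_common_score_type_alt score_dict
instance (score_dict : List (String × List (String × List (String × List (String × Int))))) (out : Int) : Decidable (Spec_get_common_score_type score_dict out) := by unfold Spec_get_common_score_type; infer_instance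

-- ===== CLAIM (what is proved, stated in full; the proofs are below) =====
def Claim_equal_get_common_score_type : Prop := ∀ (score_dict : List (String × List (String × List (String × List (String × Int))))), Dom_get_common_score_type score_dict → Pre_get_common_score_type score_dict → Spec_get_common_score_type score_dict (get_common_score_type score_dict)

-- ===== LEMMAS AND PROOFS =====

-- the flat-list version of B's scan
def pvGoList (l : List Int) (cand : Option Int) : Option (Option Int) :=
  match l with
  | [] => some cand
  | s :: rest =>
    match cand with
    | none => pvGoList rest (some s)
    | some v => if s ≠ v then none else pvGoList rest (some v)

theorem pvGoList_append (l₁ l₂ : List Int) (c : Option Int) :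
    pvGoList (l₁ ++ l₂) c = (pvGoList l₁ c).bind (pvGoList l₂) := by
  induction l₁ generalizing c with
  | nil => simp [pvGoList]
  | cons s rest ih =>
    cases c with
    | none => simp only [pvGoList]; exact ih (some s)
    | some v =>
      by_cases h : s = v <;> simp [pvGoList, h, ih]

theorem pvGoMetrics_eq (metrics : List (String × List (String × Int))) (c : Option Int) :
    pvGoMetrics metrics c
      = pvGoList (metrics.map (fun metric => (PySem.Dict.mk metric.2).getD "score" 0)) c := by
  induction metrics generalizing c with
  | nil => rfl
  | cons m rest ih =>
    cases c with
    | none => simp [pvGoMetrics, pvGoList, ih]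
    | some v =>
      by_cases h : (PySem.Dict.mk m.2).getD "score" 0 = v <;>
        simp [pvGoMetrics, pvGoList, h, ih]

theorem pvGoSubjects_eq (subjects : List (String × List (String × List (String × Int)))) (c : Option Int) :
    pvGoSubjects subjects c
      = pvGoList (subjects.flatMap (fun metrics =>
          metrics.2.map (fun metric => (PySem.Dict.mk metric.2).getD "score" 0))) c := by
  induction subjects generalizing c with
  | nil => rfl
  | cons ms rest ih =>
    simp only [pvGoSubjects, List.flatMap_cons, pvGoList_append, pvGoMetrics_eq]
    cases pvGoList (ms.2.map (fun metric => (PySem.Dict.mk metric.2).getD "score" 0)) c with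
    | none => rfl
    | some c' => simpa using ih c'

theorem pvGoTop_eq (d : List (String × List (String × List (String × List (String × Int))))) (c : Option Int) :
    pvGoTop d c = pvGoList (pvScoresOf d) c := by
  induction d generalizing c with
  | nil => rfl
  | cons subj rest ih =>
    simp only [pvGoTop, pvScoresOf, List.flatMap_cons, pvGoList_append, pvGoSubjects_eq]
    cases pvGoList (subj.2.flatMap (fun metrics =>
        metrics.2.map (fun metric => (PySem.Dict.mk metric.2).getD "score" 0))) c with
    | none => rfl
    | some c' => simpa [pvScoresOf] using ih c'

theorem pvGoList_some (l : List Int) (v : Int) :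
    pvGoList l (some v) = if ∀ y ∈ l, y = v then some (some v) else none := by
  induction l with
  | nil => simp [pvGoList]
  | cons s rest ih =>
    by_cases h : s = v
    · subst h; simp [pvGoList, ih]
    · simp [pvGoList, h]

theorem pvSet_ofList_all {l : List Int} {x : Int} (hne : l ≠ [])
    (hall : ∀ y ∈ l, y = x) : PySem.Set.ofList l = [x] := by
  have hnd : (PySem.Set.ofList l).Nodup := PySem.Set.nodup_ofList l
  have hmem : ∀ y, y ∈ PySem.Set.ofList l ↔ y ∈ l := fun y => PySem.Set.mem_ofList l y
  have hx : x ∈ PySem.Set.ofList l := by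
    rw [hmem]
    cases l with
    | nil => exact absurd rfl hne
    | cons a t => have := hall a (by simp); simpa [this] using List.mem_cons_self
  cases hs : PySem.Set.ofList l with
  | nil => rw [hs] at hx; exact absurd hx (by simp)
  | cons a t =>
    have ha : a = x := hall a ((hmem a).1 (by rw [hs]; simp))
    have ht : t = [] := by
      cases t with
      | nil => rfl
      | cons b t' =>
        have hb : b = x := hall b ((hmem b).1 (by rw [hs]; simp))
        rw [hs] at hnd
        simp [ha, hb] at hnd
    simp [ha, ht]

theorem pvMain (d : List (String × List (String × List (String × List (String × Int))))) :
    get_common_score_type d = get_common_score_type_alt d := by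
  unfold get_common_score_type get_common_score_type_alt
  rw [pvGoTop_eq]
  cases hL : pvScoresOf d with
  | nil => simp [pvGoList, PySem.Set.ofList]
  | cons x rest =>
    simp only [pvGoList, pvGoList_some]
    by_cases hall : ∀ y ∈ rest, y = x
    · have hset : PySem.Set.ofList (x :: rest) = [x] :=
        pvSet_ofList_all (by simp) (by
          intro y hy; rw [List.mem_cons] at hy
          rcases hy with h | h; exact h; exact hall y h)
      rw [if_pos hall]; simp [hset]
    · have ⟨y, hy, hyx⟩ : ∃ y ∈ rest, y ≠ x := by
        push Not at hall; exact hall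
      have hlen : (PySem.Set.ofList (x :: rest)).length ≠ 1 := by
        intro h1
        obtain ⟨z, hz⟩ := List.length_eq_one_iff.mp h1
        have hxz : x = z := by
          have : x ∈ PySem.Set.ofList (x :: rest) := (PySem.Set.mem_ofList _ _).2 (by simp)
          rw [hz] at this; simpa using this
        have hyz : y = z := by
          have : y ∈ PySem.Set.ofList (x :: rest) := (PySem.Set.mem_ofList _ _).2 (by simp [hy])
          rw [hz] at this; simpa using this
        exact hyx (hyz.trans hxz.symm)
      rw [if_neg hlen, if_neg (show ¬ ∀ y ∈ rest, y = x by push Not; exact ⟨y, hy, hyx⟩)]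

-- ===== VERDICT (by name: the statement is the Claim_ definition above) =====
theorem get_common_score_type_spec : Claim_equal_get_common_score_type := by
  intro d _ _
  unfold Spec_get_common_score_type
  exact pvMain d
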